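-- pv_equiv track=rewrite | github.com/BubbaDiego/sonic8 | backend/scripts/perps_open_long.py | _best_key
-- ===== SOURCE A (Python) =====
-- from typing import Optional, List, Dict, Tuple, Any, Mapping
--
-- def _best_key(keys: list[str], target: str) -> Optional[str]:
--     """
--     Pick the best key from `keys` that matches `target`:
--     1) exact match
--     2) snake_case match
--     3) fuzzy: prefer entries containing 'increase','position','request','market' with
--        at least 'position' & 'request' present.
--     """
--     if target in keys:
--         return target
--     snake = _camel_to_snake(target)
--     if snake in keys:
--         return snake
--     want = ["increase", "position", "request", "market"]
--     ranked = []
--     for k in keys: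
--         l = k.lower()
--         if "position" in l and "request" in l:
--             ranked.append((sum(w in l for w in want), k))
--     ranked.sort(reverse=True)
--     return ranked[0][1] if ranked else None
--
-- def _camel_to_snake(name: str) -> str:
--     out = []
--     for ch in name:
--         out.append("_" + ch.lower() if ch.isupper() else ch)
--     s = "".join(out)
--     return s[1:] if s.startswith("_") else s
-- ===== SOURCE B (Python) =====
-- from typing import Optional
--
--
-- def _camel_to_snake(name: str) -> str:
--     s = "".join("_" + ch.lower() if ch.isupper() else ch for ch in name)
--     return s.removeprefix("_")
--
--
-- def _best_key(keys: list[str], target: str) -> Optional[str]: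
--     if target in keys:
--         return target
--     snake = _camel_to_snake(target)
--     if snake in keys:
--         return snake
--     want = ("increase", "position", "request", "market")
--     best = None
--     for k in keys:
--         l = k.lower()
--         if "position" in l and "request" in l:
--             score = sum(w in l for w in want)
--             if best is None or (score, k) > best:
--                 best = (score, k)
--     return best[1] if best is not None else None
-- ===== Notes on version B (the rewrite author's own statement) =====
-- stated objective: alternative
-- what changed: The fuzzy stage keeps a single running best (score, key) pair with a strict lexicographic comparison in one pass instead of building a list of all candidates and sorting it in reverse to take its head.
import Mathlib
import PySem

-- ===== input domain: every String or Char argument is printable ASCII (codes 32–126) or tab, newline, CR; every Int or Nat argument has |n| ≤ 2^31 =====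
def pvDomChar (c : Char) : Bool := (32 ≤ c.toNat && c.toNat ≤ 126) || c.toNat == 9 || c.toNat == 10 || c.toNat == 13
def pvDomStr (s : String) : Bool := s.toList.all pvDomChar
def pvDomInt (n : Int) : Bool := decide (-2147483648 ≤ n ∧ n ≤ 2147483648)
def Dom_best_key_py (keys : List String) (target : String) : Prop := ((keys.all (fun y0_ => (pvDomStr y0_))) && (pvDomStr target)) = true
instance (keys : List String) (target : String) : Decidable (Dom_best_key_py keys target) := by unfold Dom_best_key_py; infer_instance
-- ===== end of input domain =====

-- B replaces A's build-all-candidates-then-reverse-sort fuzzy stage by a one-pass running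
-- strict-lexicographic maximum (and writes _camel_to_snake as a join-of-pieces + removeprefix);
-- objective: alternative (same observable result, no sort and no candidate list).

-- shared named subexpressions (both Pythons compute exactly these values inline)
def pvCond (k : String) : Bool :=
  PySem.Str.isIn "position" (PySem.Str.lower k) && PySem.Str.isIn "request" (PySem.Str.lower k)

def pvScore (k : String) : Int :=
  (["increase", "position", "request", "market"]).foldl
    (fun s w => s + (if PySem.Str.isIn w (PySem.Str.lower k) then (1 : Int) else 0)) 0

-- ===== PORT A =====
-- _camel_to_snake: list of pieces built with foldl-append, "".join, s[1:] if s.startswith("_")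
def pvCamelSnakeA (name : String) : String :=
  let out := name.toList.foldl
    (fun acc ch => acc ++ [if PySem.Chars.isupper ch then '_' :: PySem.Chars.lower [ch] else [ch]])
    ([] : List (List Char))
  let s := PySem.Chars.join [] out
  String.ofList (if PySem.Chars.startswith s ['_'] then PySem.List.slice s (some 1) else s)

def best_key_py (keys : List String) (target : String) : Option String :=
  if keys.contains target then some target
  else
    let snake := pvCamelSnakeA target
    if keys.contains snake then some snake
    else
      let ranked := keys.foldl
        (fun acc k => if pvCond k then acc ++ [(pvScore k, k)] else acc) []
      let ranked := PySem.List.sorted2 ranked Prod.fst Prod.snd true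
      match ranked with
      | [] => none
      | (_, k) :: _ => some k

-- ===== PORT B =====
-- _camel_to_snake: one flatMap (the generator inside "".join), then removeprefix("_")
def pvCamelSnakeB (name : String) : String :=
  let s := name.toList.flatMap
    (fun ch => if PySem.Chars.isupper ch then ['_', PySem.Chars.lowerChar ch] else [ch])
  String.ofList (match s with
    | '_' :: rest => rest
    | _ => s)

-- 'if best is None or (score, k) > best: best = (score, k)' (strict Python tuple comparison)
def pvStep (best : Option (Int × String)) (p : Int × String) : Option (Int × String) :=
  match best with
  | none => some p
  | some b => if b.1 < p.1 || (b.1 == p.1 && decide (b.2 < p.2)) then some p else some b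

def best_key_py_alt (keys : List String) (target : String) : Option String :=
  if keys.contains target then some target
  else
    let snake := pvCamelSnakeB target
    if keys.contains snake then some snake
    else
      let best := keys.foldl
        (fun best k => if pvCond k then pvStep best (pvScore k, k) else best)
        (none : Option (Int × String))
      best.map (fun b => b.2)

-- ===== PRECONDITION & SPEC =====
def Spec_best_key_py (keys : List String) (target : String) (out : Option String) : Prop := out = best_key_py_alt keys target
instance (keys : List String) (target : String) (out : Option String) : Decidable (Spec_best_key_py keys target out) := by unfold Spec_best_key_py; infer_instance

-- ===== CLAIM (what is proved, stated in full; the proofs are below) =====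
def Claim_equal_best_key_py : Prop := ∀ (keys : List String) (target : String), Dom_best_key_py keys target → Spec_best_key_py keys target (best_key_py keys target)

-- ===== LEMMAS AND PROOFS =====

-- sorted2's internal reverse comparison, named (proof-side helper)
def pvBefore (a b : Int × String) : Bool :=
  decide (b.1 < a.1) || (!decide (a.1 < b.1) && decide (b.2 < a.2))

theorem pv_sorted2_eq (r : List (Int × String)) :
    PySem.List.sorted2 r Prod.fst Prod.snd true
      = r.foldl (fun acc x => PySem.List.insertBy pvBefore x acc) [] := rfl

-- "".join(pieces) with empty separator is concatenation
theorem pv_join_nil (l : List (List Char)) : PySem.Chars.join [] l = l.flatten := by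
  induction l with
  | nil => rfl
  | cons x xs ih =>
    cases xs with
    | nil => simp [PySem.Chars.join, List.intercalate]
    | cons y ys =>
      simp only [PySem.Chars.join, List.intercalate] at *
      simp [List.intersperse, List.flatten] at *
      simpa using ih

-- the two _camel_to_snake ports agree
theorem pv_camel_eq (name : String) : pvCamelSnakeA name = pvCamelSnakeB name := by
  unfold pvCamelSnakeA pvCamelSnakeB
  simp only [PySem.List.foldl_append_singleton_eq_map, List.nil_append, pv_join_nil,
    ← List.flatMap_def]
  have hchunk : (fun ch => if PySem.Chars.isupper ch then '_' :: PySem.Chars.lower [ch] else [ch])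
      = (fun ch => if PySem.Chars.isupper ch then ['_', PySem.Chars.lowerChar ch] else [ch]) := by
    funext ch
    by_cases h : PySem.Chars.isupper ch <;> simp [h, PySem.Chars.lower]
  rw [hchunk]
  set s := name.toList.flatMap
    (fun ch => if PySem.Chars.isupper ch then ['_', PySem.Chars.lowerChar ch] else [ch]) with hs
  clear hs
  congr 1
  cases s with
  | nil =>
    have h : PySem.Chars.startswith [] ['_'] = false := by decide
    rw [h]
    simp
  | cons c r =>
    by_cases hc : c = '_'
    · subst hc
      have h : PySem.Chars.startswith ('_' :: r) ['_'] = true := by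
        rw [PySem.Chars.startswith_iff]; exact ⟨r, rfl⟩
      rw [h, if_pos rfl, PySem.List.slice_from ('_' :: r) (a := 1) (by norm_num)]
      rfl
    · have h : PySem.Chars.startswith (c :: r) ['_'] = false := by
        rw [Bool.eq_false_iff]
        intro h
        rw [PySem.Chars.startswith_iff, List.cons_prefix_cons] at h
        exact hc h.1.symm
      rw [h]
      simp only [Bool.false_eq_true, if_false]
      split <;> simp_all

-- Python's strict tuple comparison b < p equals sorted2's internal lex test
theorem pv_lt_eq (b p : Int × String) :
    (decide (b.1 < p.1) || (!decide (p.1 < b.1) && decide (b.2 < p.2)))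
      = (b.1 < p.1 || (b.1 == p.1 && decide (b.2 < p.2))) := by
  by_cases h1 : b.1 < p.1
  · simp [h1]
  · by_cases h2 : p.1 < b.1
    · have h3 : ¬ b.1 = p.1 := by omega
      simp [h1, h2, h3]
    · have h3 : b.1 = p.1 := by omega
      simp [h3]

-- head of one insertion step
theorem pv_head_insertBy (before : Int × String → Int × String → Bool)
    (x : Int × String) (ys : List (Int × String)) :
    (PySem.List.insertBy before x ys).head? =
      some (match ys.head? with
            | none => x
            | some y => if before x y then x else y) := by
  cases ys with
  | nil => rfl
  | cons y t =>
    show (if before x y = true then x :: y :: t else y :: PySem.List.insertBy before x t).head? = _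
    by_cases h : before x y = true <;> simp [h]

-- head of the reverse insertion sort IS the one-pass running strict maximum
theorem pv_head_sorted_eq_fold (r : List (Int × String)) :
    (PySem.List.sorted2 r Prod.fst Prod.snd true).head? = r.foldl pvStep none := by
  rw [pv_sorted2_eq]
  induction r using List.reverseRecOn with
  | nil => rfl
  | append_singleton r x ih =>
    rw [List.foldl_append, List.foldl_append, List.foldl_cons, List.foldl_nil,
      List.foldl_cons, List.foldl_nil, pv_head_insertBy, ih]
    cases hb : List.foldl pvStep none r with
    | none => rfl
    | some b =>
      simp only [pvBefore, pvStep, pv_lt_eq]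
      exact apply_ite some _ _ _

-- a guarded fold over keys is a fold over the guarded-mapped list
theorem pv_fold_filter (keys : List String) (b0 : Option (Int × String)) :
    keys.foldl (fun best k => if pvCond k then pvStep best (pvScore k, k) else best) b0
      = ((keys.filter pvCond).map (fun k => (pvScore k, k))).foldl pvStep b0 := by
  induction keys generalizing b0 with
  | nil => rfl
  | cons k t ih =>
    by_cases h : pvCond k <;> simp [h, ih]

-- the fuzzy stage of A equals the fuzzy stage of B
theorem pv_fuzzy_eq (keys : List String) :
    (match PySem.List.sorted2
        (keys.foldl (fun acc k => if pvCond k then acc ++ [(pvScore k, k)] else acc) [])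
        Prod.fst Prod.snd true with
      | [] => none
      | (_, k) :: _ => some k)
      = (keys.foldl (fun best k => if pvCond k then pvStep best (pvScore k, k) else best)
          (none : Option (Int × String))).map (fun b => b.2) := by
  rw [PySem.List.foldl_append_if, List.nil_append, pv_fold_filter]
  rw [← pv_head_sorted_eq_fold]
  cases PySem.List.sorted2 ((keys.filter pvCond).map (fun k => (pvScore k, k)))
      Prod.fst Prod.snd true with
  | nil => rfl
  | cons p t => rfl

-- ===== VERDICT (by name: the statement is the Claim_ definition above) =====
theorem best_key_py_spec : Claim_equal_best_key_py := by
  intro keys target _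
  show best_key_py keys target = best_key_py_alt keys target
  simp only [best_key_py, best_key_py_alt, pv_camel_eq]
  split_ifs with h1 h2
  · rfl
  · rfl
  · exact pv_fuzzy_eq keys
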